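-- pv_equiv track=rewrite | github.com/jramaswami/Binary_Search_Python | hop_cost_sequel.py | solve
-- ===== SOURCE A (Python) =====
-- import collections
--
-- def solve(nums):
--     locations = collections.defaultdict(list)
--     for i, n in enumerate(nums):
--         locations[n].append(i)
--     visited = [False for _ in nums]
--     queue = collections.deque()
--     queue.append((0, 0))
--     visited[0] = True
--     while queue:
--         i, h = queue.popleft()
--         if i == len(nums) - 1:
--             return h
--         if i-1 >= 0 and not visited[i-1]:
--             queue.append((i-1, h+1))
--             visited[i-1] = True
--         if not visited[i+1]:
--             queue.append((i+1, h+1))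
--             visited[i+1] = True
--         if locations[nums[i]]:
--             for j in locations[nums[i]]:
--                 queue.append((j, h+1))
--             locations[nums[i]] = []
--     return -1
-- ===== SOURCE B (Python) =====
-- def solve(nums):
--     # Round-based reachability relaxation: no queue, no visited-at-enqueue bookkeeping.
--     # Each round marks every index adjacent (step or shared value) to the reached set;
--     # the answer is the round at which the last index becomes reached, -1 at a fixed point.
--     n = len(nums)
--     reach = [False] * n
--     reach[0] = True
--     h = 0
--     while True:
--         if reach[n - 1]:
--             return h
--         live = {nums[j] for j in range(n) if reach[j]}
--         new = [i for i in range(n)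
--                if not reach[i]
--                and ((i > 0 and reach[i - 1])
--                     or (i + 1 < n and reach[i + 1])
--                     or nums[i] in live)]
--         if not new:
--             return -1
--         for i in new:
--             reach[i] = True
--         h += 1
-- ===== Notes on version B (the rewrite author's own statement) =====
-- stated objective: alternative
-- what changed: Replaces A's queue-driven BFS (deque, visited-marking at enqueue, per-value list clearing) by a round-based reachability relaxation: each round rescans the whole array and marks every index adjacent to the currently reached set, counting rounds until the last index is reached or a fixed point is hit.
import Mathlib
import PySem

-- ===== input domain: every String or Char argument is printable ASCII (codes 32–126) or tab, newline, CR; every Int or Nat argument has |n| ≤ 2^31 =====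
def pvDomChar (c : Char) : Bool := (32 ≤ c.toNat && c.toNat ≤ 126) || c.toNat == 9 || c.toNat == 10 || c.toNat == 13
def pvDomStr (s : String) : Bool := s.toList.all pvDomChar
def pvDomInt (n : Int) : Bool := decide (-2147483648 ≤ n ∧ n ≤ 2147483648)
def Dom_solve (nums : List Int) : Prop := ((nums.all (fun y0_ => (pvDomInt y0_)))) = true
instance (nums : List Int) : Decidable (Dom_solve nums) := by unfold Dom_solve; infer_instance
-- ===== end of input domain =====

-- B replaces A's queue-driven BFS by a round-based reachability relaxation (whole-array rescans,
-- no queue/visited-at-enqueue/dict-clearing); alternative algorithm, return value only.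

-- ===== PORT A =====
-- A's while-loop over the deque of (index, hops) pairs; fuel (3n+2 ≥ total pops, since every
-- enqueue either flips a visited flag or consumes a locations entry) only makes it total.
def solveLoopA (n : Nat) (nums : List Int) :
    Nat → List (Nat × Int) → List Bool → PySem.Dict Int (List Nat) → Int
  | 0, _, _, _ => -1
  | _ + 1, [], _, _ => -1
  | fuel + 1, (i, h) :: q, v, l =>
    if i = n - 1 then h
    else
      let (q, v) := if 1 ≤ i ∧ v.getD (i - 1) false = false
        then (q ++ [(i - 1, h + 1)], v.set (i - 1) true) else (q, v)
      let (q, v) := if v.getD (i + 1) false = false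
        then (q ++ [(i + 1, h + 1)], v.set (i + 1) true) else (q, v)
      let js := l.getD (nums.getD i 0) []
      let (q, l) := if js ≠ [] then (q ++ js.map (fun j => (j, h + 1)), l.insert (nums.getD i 0) [])
        else (q, l)
      solveLoopA n nums fuel q v l

def solve (nums : List Int) : Int :=
  let locs := (PySem.List.enumerate nums).foldl
    (fun d p => d.modify p.2 [] (· ++ [p.1.toNat])) PySem.Dict.empty
  let v := (List.replicate nums.length false).set 0 true
  solveLoopA nums.length nums (3 * nums.length + 2) [(0, 0)] v locs

-- ===== PORT B =====
-- B's 'while True' loop over rounds; each round rescans range(n). Fuel n+2 only makes it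
-- total (the reached set grows every round that does not return).
def solveAltLoop (n : Nat) (nums : List Int) : Nat → List Bool → Int → Int
  | 0, _, _ => -1
  | fuel + 1, reach, h =>
    if reach.getD (n - 1) false then h
    else
      let live : PySem.Set Int := PySem.Set.ofList
        (((List.range n).filter (fun j => reach.getD j false)).map (fun j => nums.getD j 0))
      let new := (List.range n).filter (fun i =>
        !(reach.getD i false) &&
          ((decide (0 < i) && reach.getD (i - 1) false) ||
           (decide (i + 1 < n) && reach.getD (i + 1) false) ||
           live.contains (nums.getD i 0)))
      if new = [] then -1
      else solveAltLoop n nums fuel (new.foldl (fun r i => r.set i true) reach) (h + 1)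

def solve_alt (nums : List Int) : Int :=
  let n := nums.length
  solveAltLoop n nums (n + 2) ((List.replicate n false).set 0 true) 0

-- ===== PRECONDITION & SPEC =====
-- Pre_ excludes only the empty list, on which both Pythons raise IndexError (reach[0] / visited[0]).
def Pre_solve (nums : List Int) : Prop := nums ≠ []
instance (nums : List Int) : Decidable (Pre_solve nums) := by unfold Pre_solve; infer_instance

def pvWitness_solve : List Int := [4, 2, 4]

def Spec_solve (nums : List Int) (out : Int) : Prop := out = solve_alt nums
instance (nums : List Int) (out : Int) : Decidable (Spec_solve nums out) := by unfold Spec_solve; infer_instance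

-- ===== CLAIM (what is proved, stated in full; the proofs are below) =====
def Claim_equal_solve : Prop := ∀ (nums : List Int), Dom_solve nums → Pre_solve nums → Spec_solve nums (solve nums)

-- ===== LEMMAS AND PROOFS =====

-- proof-side helper: A's queue always consists of the current level tagged h followed by the
-- next level tagged h+1; levelLoop is that two-list view of solveLoopA.
def levelLoop (n : Nat) (nums : List Int) :
    Nat → List Nat → List Nat → Int → List Bool → PySem.Dict Int (List Nat) → Int
  | 0, _, _, _, _, _ => -1
  | fuel + 1, [], nxt, h, v, l =>
    match nxt with
    | [] => -1
    | j :: tl => levelLoop n nums (fuel + 1) (j :: tl) [] (h + 1) v l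
  | fuel + 1, i :: rest, nxt, h, v, l =>
    if i = n - 1 then h
    else
      let (nxt, v) := if 1 ≤ i ∧ v.getD (i - 1) false = false
        then (nxt ++ [i - 1], v.set (i - 1) true) else (nxt, v)
      let (nxt, v) := if v.getD (i + 1) false = false
        then (nxt ++ [i + 1], v.set (i + 1) true) else (nxt, v)
      let js := l.getD (nums.getD i 0) []
      let (nxt, l) := if js ≠ [] then (nxt ++ js, l.insert (nums.getD i 0) []) else (nxt, l)
      levelLoop n nums fuel rest nxt h v l
  termination_by fuel f _ _ _ _ => (fuel, if f.isEmpty then 1 else 0)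
  decreasing_by
  · simp_all [Prod.lex_iff]
  · simp [Prod.lex_iff]

theorem loopA_eq_levelLoop (n : Nat) (nums : List Int) :
    ∀ (fuel : Nat) (f nxt : List Nat) (h : Int) (v : List Bool)
      (l : PySem.Dict Int (List Nat)),
      solveLoopA n nums fuel (f.map (fun j => (j, h)) ++ nxt.map (fun j => (j, h + 1))) v l
        = levelLoop n nums fuel f nxt h v l := by
  intro fuel
  induction fuel with
  | zero => intro f nxt h v l; simp [solveLoopA, levelLoop]
  | succ fuel ih =>
    have hcons : ∀ (i : Nat) (rest nxt : List Nat) (h : Int) (v : List Bool)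
        (l : PySem.Dict Int (List Nat)),
        solveLoopA n nums (fuel + 1)
          ((i :: rest).map (fun j => (j, h)) ++ nxt.map (fun j => (j, h + 1))) v l
          = levelLoop n nums (fuel + 1) (i :: rest) nxt h v l := by
      intro i rest nxt h v l
      simp only [List.map_cons, List.cons_append]
      rw [solveLoopA, levelLoop]
      by_cases hlast : i = n - 1
      · simp [hlast]
      · simp only [hlast, if_false]
        by_cases h1 : 1 ≤ i ∧ v.getD (i - 1) false = false
        · simp only [if_pos h1]
          by_cases h2 : (v.set (i - 1) true).getD (i + 1) false = false
          · simp only [if_pos h2]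
            by_cases h3 : l.getD (nums.getD i 0) [] = []
            · simp only [h3]; simp only [ne_eq, not_true, reduceIte]; rw [← ih]; try simp [List.append_assoc]
            · rw [if_pos h3, if_pos h3]; rw [← ih]; try simp [List.append_assoc]
          · simp only [if_neg h2]
            by_cases h3 : l.getD (nums.getD i 0) [] = []
            · simp only [h3]; simp only [ne_eq, not_true, reduceIte]; rw [← ih]; try simp [List.append_assoc]
            · rw [if_pos h3, if_pos h3]; rw [← ih]; try simp [List.append_assoc]
        · simp only [if_neg h1]
          by_cases h2 : v.getD (i + 1) false = false
          · simp only [if_pos h2]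
            by_cases h3 : l.getD (nums.getD i 0) [] = []
            · simp only [h3]; simp only [ne_eq, not_true, reduceIte]; rw [← ih]; try simp [List.append_assoc]
            · rw [if_pos h3, if_pos h3]; rw [← ih]; try simp [List.append_assoc]
          · simp only [if_neg h2]
            by_cases h3 : l.getD (nums.getD i 0) [] = []
            · simp only [h3]; simp only [ne_eq, not_true, reduceIte]; rw [← ih]; try simp [List.append_assoc]
            · rw [if_pos h3, if_pos h3]; rw [← ih]; try simp [List.append_assoc]
    intro f nxt h v l
    cases f with
    | cons i rest => exact hcons i rest nxt h v l
    | nil =>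
      cases nxt with
      | nil => simp [solveLoopA, levelLoop]
      | cons j tl =>
        have hc := hcons j tl [] (h + 1) v l
        rw [levelLoop]
        simp only [List.map_nil, List.nil_append, List.append_nil] at hc ⊢
        exact hc

-- the shared-value / adjacent-step relation of the implicit graph
def adjB (n : Nat) (nums : List Int) (u r : Nat) : Bool :=
  decide (r < n) && (decide (r + 1 = u) || decide (r = u + 1) ||
    decide (nums.getD r 0 = nums.getD u 0))

-- indices at graph distance ≤ k from index 0
def Rset (n : Nat) (nums : List Int) : Nat → Finset Nat
  | 0 => {0}
  | k + 1 => Rset n nums k ∪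
      (Finset.range n).filter (fun r => ∃ u ∈ Rset n nums k, adjB n nums u r = true)

-- all indices holding value c (A's locations[c])
def grp (n : Nat) (nums : List Int) (c : Int) : List Nat :=
  (List.range n).filter (fun j => nums.getD j 0 == c)

def Vcnt (n : Nat) (v : List Bool) : Nat :=
  ((Finset.range n).filter (fun j => v.getD j false = false)).card

def Wcnt (n : Nat) (nums : List Int) (C : Finset Int) : Nat :=
  ((Finset.range n).filter (fun j => nums.getD j 0 ∉ C)).card

theorem mem_Rset_succ_iff (n : Nat) (nums : List Int) (k r : Nat) :
    r ∈ Rset n nums (k + 1) ↔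
      r ∈ Rset n nums k ∨ (r < n ∧ ∃ u ∈ Rset n nums k, adjB n nums u r = true) := by
  simp [Rset, Finset.mem_union, Finset.mem_filter, Finset.mem_range, and_comm]

theorem Rset_subset_succ (n : Nat) (nums : List Int) (k : Nat) :
    Rset n nums k ⊆ Rset n nums (k + 1) := by
  intro r hr; exact (mem_Rset_succ_iff n nums k r).2 (Or.inl hr)

theorem Rset_mono (n : Nat) (nums : List Int) {k m : Nat} (h : k ≤ m) :
    Rset n nums k ⊆ Rset n nums m := by
  induction m with
  | zero => simp_all
  | succ m ih =>
    rcases Nat.lt_or_ge k (m + 1) with h' | h'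
    · exact fun r hr => Rset_subset_succ n nums m (ih (by omega) hr)
    · have : k = m + 1 := by omega
      subst this; exact fun r hr => hr

theorem Rset_subset_range (n : Nat) (nums : List Int) (hn : 0 < n) (k : Nat) :
    Rset n nums k ⊆ Finset.range n := by
  induction k with
  | zero => intro r hr; simp [Rset] at hr; subst hr; simpa using hn
  | succ k ih =>
    intro r hr
    rcases (mem_Rset_succ_iff n nums k r).1 hr with h | h
    · exact ih h
    · simpa using h.1

theorem Rset_fix (n : Nat) (nums : List Int) (k : Nat)
    (h : Rset n nums (k + 1) ⊆ Rset n nums k) :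
    ∀ m, Rset n nums m ⊆ Rset n nums k := by
  have heq : Rset n nums (k + 1) = Rset n nums k :=
    Finset.Subset.antisymm h (Rset_subset_succ n nums k)
  intro m
  induction m with
  | zero => exact Rset_mono n nums (Nat.zero_le k)
  | succ m ih =>
    intro r hr
    rcases (mem_Rset_succ_iff n nums m r).1 hr with h' | h'
    · exact ih h'
    · obtain ⟨hrn, u, hu, hadj⟩ := h'
      have : r ∈ Rset n nums (k + 1) := by
        rw [mem_Rset_succ_iff]
        exact Or.inr ⟨hrn, u, ih hu, hadj⟩
      rw [heq] at this; exact this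

theorem mem_grp (n : Nat) (nums : List Int) (c : Int) (j : Nat) :
    j ∈ grp n nums c ↔ j < n ∧ nums.getD j 0 = c := by
  simp [grp]

-- initial locations dict: getD c [] is exactly grp c
theorem locs_getD (nums : List Int) (c : Int) :
    ((PySem.List.enumerate nums).foldl
      (fun d p => d.modify p.2 [] (· ++ [p.1.toNat])) PySem.Dict.empty).getD c []
      = grp nums.length nums c := by
  have h1 : (PySem.List.enumerate nums).foldl
      (fun d p => d.modify p.2 [] (· ++ [p.1.toNat])) PySem.Dict.empty
      = ((PySem.List.enumerate nums).map (fun p => (p.2, p.1.toNat))).foldl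
        (fun d q => d.modify q.1 [] (· ++ [q.2])) PySem.Dict.empty := by
    rw [List.foldl_map]
  rw [h1, PySem.Dict.getD_foldl_modify_append]
  rw [PySem.List.enumerate_eq_map_pyRange nums 0, PySem.List.len]
  rw [PySem.List.pyRange_zero_natCast]
  simp [List.filter_map, List.map_map, Function.comp_def, PySem.List.pyGetD_natCast, grp]

theorem set_getD (v : List Bool) (i j : Nat) :
    (v.set i true).getD j false = if i = j ∧ i < v.length then true else v.getD j false := by
  simp [List.getD_eq_getElem?_getD, List.getElem?_set]
  split_ifs <;> simp_all

-- getD after foldl-set: true iff previously true or in the list of set indices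
theorem foldl_set_getD (new : List Nat) :
    ∀ (reach : List Bool) (j : Nat), (∀ i ∈ new, i < reach.length) →
      (new.foldl (fun r i => r.set i true) reach).getD j false
        = (reach.getD j false || decide (j ∈ new)) := by
  induction new with
  | nil => intro reach j _; simp
  | cons i tl ih =>
    intro reach j hlt
    have hset : ∀ a ∈ tl, a < (reach.set i true).length := by
      intro a ha; simpa using hlt a (List.mem_cons_of_mem i ha)
    rw [List.foldl_cons, ih _ j hset, set_getD]
    have hi : i < reach.length := hlt i List.mem_cons_self
    by_cases hj : i = j
    · subst hj; simp [hi]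
    · simp [hj, Ne.symm hj]

theorem foldl_set_length (new : List Nat) :
    ∀ (reach : List Bool), (new.foldl (fun r i => r.set i true) reach).length = reach.length := by
  induction new with
  | nil => intro reach; rfl
  | cons i tl ih => intro reach; simp [List.foldl_cons, ih]

-- membership in B's per-round 'new' list: exactly the indices newly reached this round
def newL (n : Nat) (nums : List Int) (reach : List Bool) : List Nat :=
  (List.range n).filter (fun i =>
    !(reach.getD i false) &&
      ((decide (0 < i) && reach.getD (i - 1) false) ||
       (decide (i + 1 < n) && reach.getD (i + 1) false) ||
       (PySem.Set.ofList (((List.range n).filter (fun j => reach.getD j false)).map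
          (fun j => nums.getD j 0))).contains (nums.getD i 0)))

theorem adjB_true_iff (n : Nat) (nums : List Int) (u r : Nat) :
    adjB n nums u r = true ↔
      r < n ∧ (r + 1 = u ∨ r = u + 1 ∨ nums.getD r 0 = nums.getD u 0) := by
  simp [adjB, or_assoc]

theorem newList_mem (n : Nat) (nums : List Int) (hn : 0 < n) (k : Nat) (reach : List Bool)
    (hrep : ∀ j, j < n → (reach.getD j false = true ↔ j ∈ Rset n nums k)) (i : Nat) :
    i ∈ newL n nums reach ↔ i ∈ Rset n nums (k + 1) ∧ i ∉ Rset n nums k := by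
  simp only [newL, List.mem_filter, List.mem_range, Bool.and_eq_true, Bool.or_eq_true,
    Bool.not_eq_true', decide_eq_true_eq, PySem.Set.contains_iff, PySem.Set.mem_ofList,
    List.mem_map, List.mem_filter, List.mem_range]
  constructor
  · rintro ⟨hin, hnot, hcond⟩
    have hni : i ∉ Rset n nums k := by
      intro h
      have h2 := (hrep i hin).2 h
      rw [h2] at hnot
      exact Bool.noConfusion hnot
    refine ⟨(mem_Rset_succ_iff n nums k i).2 (Or.inr ⟨hin, ?_⟩), hni⟩
    rcases hcond with (⟨hpos, hr⟩ | ⟨hlt, hr⟩) | ⟨j, ⟨⟨hj, hrj⟩, hv⟩⟩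
    · exact ⟨i - 1, (hrep (i - 1) (by omega)).1 hr,
        (adjB_true_iff n nums (i - 1) i).2 ⟨hin, Or.inr (Or.inl (by omega))⟩⟩
    · exact ⟨i + 1, (hrep (i + 1) hlt).1 hr,
        (adjB_true_iff n nums (i + 1) i).2 ⟨hin, Or.inl (by omega)⟩⟩
    · exact ⟨j, (hrep j hj).1 hrj,
        (adjB_true_iff n nums j i).2 ⟨hin, Or.inr (Or.inr hv.symm)⟩⟩
  · rintro ⟨hsucc, hni⟩
    rcases (mem_Rset_succ_iff n nums k i).1 hsucc with h | ⟨hin, u, hu, hadj⟩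
    · exact absurd h hni
    have hun : u < n := by simpa using Rset_subset_range n nums hn k hu
    refine ⟨hin, ?_, ?_⟩
    · by_cases h : reach.getD i false = true
      · exact absurd ((hrep i hin).1 h) hni
      · simpa using h
    · rw [adjB_true_iff] at hadj
      rcases hadj.2 with h | h | h
      · exact Or.inl (Or.inr ⟨by omega, (hrep (i + 1) (by omega)).2 (by rwa [h])⟩)
      · refine Or.inl (Or.inl ⟨by omega, (hrep (i - 1) (by omega)).2 ?_⟩)
        have he : i - 1 = u := by omega
        rwa [he]
      · exact Or.inr ⟨u, ⟨⟨hun, (hrep u hun).2 hu⟩, h.symm⟩⟩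

-- after marking the new indices, reach represents the next level
theorem reach_step (n : Nat) (nums : List Int) (hn : 0 < n) (k : Nat) (reach : List Bool)
    (hlen : reach.length = n)
    (hrep : ∀ j, j < n → (reach.getD j false = true ↔ j ∈ Rset n nums k)) :
    (∀ i ∈ newL n nums reach, i < reach.length) ∧
    ((newL n nums reach).foldl (fun r i => r.set i true) reach).length = n ∧
    (∀ j, j < n →
      (((newL n nums reach).foldl (fun r i => r.set i true) reach).getD j false = true ↔
        j ∈ Rset n nums (k + 1))) := by
  have hnewlt : ∀ i ∈ newL n nums reach, i < reach.length := by
    intro i hi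
    have h1 := ((newList_mem n nums hn k reach hrep i).1 hi).1
    have := Rset_subset_range n nums hn (k + 1) h1
    simp at this; omega
  refine ⟨hnewlt, by rw [foldl_set_length]; exact hlen, ?_⟩
  intro j hj
  rw [foldl_set_getD _ reach j hnewlt]
  constructor
  · intro h
    rw [Bool.or_eq_true] at h
    rcases h with h | h
    · exact Rset_subset_succ n nums k ((hrep j hj).1 h)
    · exact ((newList_mem n nums hn k reach hrep j).1 (by simpa using h)).1
  · intro h
    rw [Bool.or_eq_true]
    by_cases hk : j ∈ Rset n nums k
    · exact Or.inl ((hrep j hj).2 hk)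
    · exact Or.inr (decide_eq_true ((newList_mem n nums hn k reach hrep j).2 ⟨h, hk⟩))

-- B-side master lemma, reachable case
theorem masterB_reach (n : Nat) (nums : List Int) (hn : 0 < n) (dd : Nat)
    (hd : n - 1 ∈ Rset n nums dd) (hmindd : ∀ m, m < dd → n - 1 ∉ Rset n nums m) :
    ∀ (fuel k : Nat) (reach : List Bool),
      reach.length = n →
      (∀ j, j < n → (reach.getD j false = true ↔ j ∈ Rset n nums k)) →
      n + 1 ≤ fuel + (Rset n nums k).card →
      (∀ m, m < k → n - 1 ∉ Rset n nums m) →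
      solveAltLoop n nums fuel reach (k : Int) = (dd : Int) := by
  intro fuel
  induction fuel with
  | zero =>
    intro k reach hlen hrep hfuel hmin
    have hcard : (Rset n nums k).card ≤ n := by
      simpa using Finset.card_le_card (Rset_subset_range n nums hn k)
    omega
  | succ fuel ih =>
    intro k reach hlen hrep hfuel hmin
    rw [solveAltLoop]
    by_cases htgt : reach.getD (n - 1) false = true
    · rw [if_pos htgt]
      have ht : n - 1 ∈ Rset n nums k := (hrep (n - 1) (by omega)).1 htgt
      have hkdd : k = dd := by
        rcases Nat.lt_trichotomy k dd with h | h | h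
        · exact absurd ht (hmindd k h)
        · exact h
        · exact absurd hd (hmin dd h)
      rw [hkdd]
    · rw [if_neg htgt]
      have hntk : n - 1 ∉ Rset n nums k := fun h => htgt ((hrep (n - 1) (by omega)).2 h)
      show (if newL n nums reach = [] then (-1 : Int)
        else solveAltLoop n nums fuel
          ((newL n nums reach).foldl (fun r i => r.set i true) reach) ((k : Int) + 1)) = dd
      obtain ⟨hnewlt, hlen', hrep'⟩ := reach_step n nums hn k reach hlen hrep
      by_cases hnew : newL n nums reach = []
      · exfalso
        have hsub : Rset n nums (k + 1) ⊆ Rset n nums k := by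
          intro r hr
          by_contra hrk
          have := (newList_mem n nums hn k reach hrep r).2 ⟨hr, hrk⟩
          simp [hnew] at this
        exact hntk (Rset_fix n nums k hsub dd hd)
      · rw [if_neg hnew]
        have hcard : (Rset n nums k).card < (Rset n nums (k + 1)).card := by
          apply Finset.card_lt_card
          constructor
          · exact Rset_subset_succ n nums k
          · intro hsub
            rcases List.exists_mem_of_ne_nil _ hnew with ⟨i, hi⟩
            have := (newList_mem n nums hn k reach hrep i).1 hi
            exact this.2 (hsub this.1)
        have hmin' : ∀ m, m < k + 1 → n - 1 ∉ Rset n nums m := by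
          intro m hm
          rcases Nat.lt_or_ge m k with h | h
          · exact hmin m h
          · have : m = k := by omega
            subst this; exact hntk
        have hcast : (k : Int) + 1 = ((k + 1 : Nat) : Int) := by push_cast; ring
        rw [hcast]
        exact ih (k + 1) _ hlen' hrep' (by omega) hmin'

-- B-side master lemma, unreachable case
theorem masterB_unreach (n : Nat) (nums : List Int) (hn : 0 < n)
    (hun : ∀ m, n - 1 ∉ Rset n nums m) :
    ∀ (fuel k : Nat) (reach : List Bool),
      reach.length = n →
      (∀ j, j < n → (reach.getD j false = true ↔ j ∈ Rset n nums k)) →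
      solveAltLoop n nums fuel reach (k : Int) = -1 := by
  intro fuel
  induction fuel with
  | zero => intro k reach _ _; rfl
  | succ fuel ih =>
    intro k reach hlen hrep
    rw [solveAltLoop]
    have htgt : ¬ reach.getD (n - 1) false = true :=
      fun h => hun k ((hrep (n - 1) (by omega)).1 h)
    rw [if_neg htgt]
    show (if newL n nums reach = [] then (-1 : Int)
      else solveAltLoop n nums fuel
        ((newL n nums reach).foldl (fun r i => r.set i true) reach) ((k : Int) + 1)) = -1
    obtain ⟨hnewlt, hlen', hrep'⟩ := reach_step n nums hn k reach hlen hrep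
    by_cases hnew : newL n nums reach = []
    · rw [if_pos hnew]
    · rw [if_neg hnew]
      have hcast : (k : Int) + 1 = ((k + 1 : Nat) : Int) := by push_cast; ring
      rw [hcast]
      exact ih (k + 1) _ hlen' hrep'

theorem reach0_getD (n : Nat) (j : Nat) :
    ((List.replicate n false).set 0 true).getD j false = decide (j = 0 ∧ 0 < n) := by
  simp [List.getD_eq_getElem?_getD, List.getElem?_set, List.getElem?_replicate]
  split_ifs <;> simp_all <;> omega

theorem solve_alt_of_reachable (nums : List Int) (hn : 0 < nums.length) (dd : Nat)
    (hd : nums.length - 1 ∈ Rset nums.length nums dd)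
    (hmindd : ∀ m, m < dd → nums.length - 1 ∉ Rset nums.length nums m) :
    solve_alt nums = (dd : Int) := by
  have hlen0 : ((List.replicate nums.length false).set 0 true).length = nums.length := by simp
  have hrep0 : ∀ j, j < nums.length →
      (((List.replicate nums.length false).set 0 true).getD j false = true ↔
        j ∈ Rset nums.length nums 0) := by
    intro j hj
    rw [reach0_getD]
    simp only [decide_eq_true_eq, Rset, Finset.mem_singleton]
    constructor
    · rintro ⟨h, _⟩; exact h
    · intro h; exact ⟨h, hn⟩
  have := masterB_reach nums.length nums hn dd hd hmindd (nums.length + 2) 0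
    ((List.replicate nums.length false).set 0 true) hlen0 hrep0 (by omega)
    (fun m hm => absurd hm (Nat.not_lt_zero m))
  simpa using this

theorem solve_alt_of_unreachable (nums : List Int) (hn : 0 < nums.length)
    (hun : ∀ m, nums.length - 1 ∉ Rset nums.length nums m) :
    solve_alt nums = -1 := by
  have hlen0 : ((List.replicate nums.length false).set 0 true).length = nums.length := by simp
  have hrep0 : ∀ j, j < nums.length →
      (((List.replicate nums.length false).set 0 true).getD j false = true ↔
        j ∈ Rset nums.length nums 0) := by
    intro j hj
    rw [reach0_getD]
    simp only [decide_eq_true_eq, Rset, Finset.mem_singleton]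
    constructor
    · rintro ⟨h, _⟩; exact h
    · intro h; exact ⟨h, hn⟩
  have := masterB_unreach nums.length nums hn hun (nums.length + 2) 0
    ((List.replicate nums.length false).set 0 true) hlen0 hrep0
  simpa using this

theorem len_grp (n : Nat) (nums : List Int) (c : Int) :
    (grp n nums c).length = ((Finset.range n).filter (fun j => nums.getD j 0 = c)).card :=
  (Nat.add_zero _).symm

theorem Vcnt_set (n : Nat) (v : List Bool) (j : Nat) (hj : j < n) (hlen : v.length = n)
    (hf : v.getD j false = false) : Vcnt n (v.set j true) + 1 = Vcnt n v := by
  have hmem : j ∈ (Finset.range n).filter (fun j => v.getD j false = false) := by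
    rw [Finset.mem_filter]
    exact ⟨Finset.mem_range.2 hj, hf⟩
  have hset : (Finset.range n).filter (fun j' => (v.set j true).getD j' false = false)
      = ((Finset.range n).filter (fun j' => v.getD j' false = false)).erase j := by
    ext j'
    simp only [Finset.mem_filter, Finset.mem_erase, Finset.mem_range]
    rw [set_getD]
    constructor
    · rintro ⟨h1, h2⟩
      by_cases hx : j = j' ∧ j < v.length
      · rw [if_pos hx] at h2; exact absurd h2 (by simp)
      · rw [if_neg hx] at h2
        exact ⟨fun he => hx ⟨he.symm, by omega⟩, h1, h2⟩
    · rintro ⟨hne, h1, h2⟩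
      refine ⟨h1, ?_⟩
      rw [if_neg (fun hx => hne hx.1.symm)]
      exact h2
  unfold Vcnt
  rw [hset, Finset.card_erase_of_mem hmem]
  have : 0 < ((Finset.range n).filter (fun j => v.getD j false = false)).card :=
    Finset.card_pos.2 ⟨j, hmem⟩
  omega

theorem Wcnt_insert (n : Nat) (nums : List Int) (C : Finset Int) (c : Int) (hc : c ∉ C) :
    Wcnt n nums (insert c C) + (grp n nums c).length = Wcnt n nums C := by
  rw [len_grp]
  unfold Wcnt
  rw [← Finset.card_union_of_disjoint (Finset.disjoint_left.2 (by
    intro a ha hb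
    rw [Finset.mem_filter] at ha hb
    exact ha.2 (hb.2 ▸ Finset.mem_insert_self c C)))]
  congr 1
  ext j
  simp only [Finset.mem_union, Finset.mem_filter, Finset.mem_range, Finset.mem_insert, not_or]
  constructor
  · rintro (⟨h1, h2, h3⟩ | ⟨h1, h2⟩)
    · exact ⟨h1, h3⟩
    · exact ⟨h1, h2 ▸ hc⟩
  · rintro ⟨h1, h2⟩
    by_cases h : nums.getD j 0 = c
    · exact Or.inr ⟨h1, h⟩
    · exact Or.inl ⟨h1, h, h2⟩

-- a fully processed level with an empty next frontier means the target is unreachable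
theorem deadEnd (n : Nat) (nums : List Int) (k : Nat) (P : Finset Nat)
    (hPR : ∀ p ∈ P, p ∈ Rset n nums k)
    (hPt : n - 1 ∉ P)
    (hComp : ∀ r ∈ Rset n nums k, r ∈ P)
    (hNP : ∀ u ∈ P, ∀ r, adjB n nums u r = true → r ∈ P) :
    ∀ m, n - 1 ∉ Rset n nums m := by
  have hsub : Rset n nums (k + 1) ⊆ Rset n nums k := by
    intro r hr
    rcases (mem_Rset_succ_iff n nums k r).1 hr with h | ⟨hrn, u, hu, hadj⟩
    · exact h
    · exact hPR r (hNP u (hComp u hu) r hadj)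
  intro m hm
  exact hPt (hComp _ (Rset_fix n nums k hsub m hm))

-- A-side master lemma: under the BFS invariants, A's level loop returns exactly solve_alt
theorem masterA (n : Nat) (nums : List Int) (hn : 0 < n) (hlen : nums.length = n) :
    ∀ (fuel : Nat) (f nxt : List Nat) (k : Nat) (v : List Bool)
      (l : PySem.Dict Int (List Nat)) (P : Finset Nat) (C : Finset Int),
      f.length + nxt.length + Vcnt n v + Wcnt n nums C ≤ fuel →
      (∀ m, m < k → n - 1 ∉ Rset n nums m) →
      (∀ i ∈ f, i ∈ Rset n nums k) →
      (∀ j ∈ nxt, j ∈ Rset n nums (k + 1)) →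
      (∀ p ∈ P, p ∈ Rset n nums k) →
      n - 1 ∉ P →
      (∀ r ∈ Rset n nums k, r ∈ P ∨ r ∈ f) →
      (∀ u ∈ P, ∀ r, adjB n nums u r = true → r ∈ P ∨ r ∈ f ∨ r ∈ nxt) →
      (∀ j, v.getD j false = true → j ∈ P ∨ j ∈ f ∨ j ∈ nxt) →
      v.length = n →
      (∀ c ∈ C, ∀ r ∈ grp n nums c, r ∈ P ∨ r ∈ f ∨ r ∈ nxt) →
      (∀ c, l.getD c [] = if c ∈ C then [] else grp n nums c) →
      levelLoop n nums fuel f nxt (k : Int) v l = solve_alt nums := by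
  subst hlen
  intro fuel
  induction fuel with
  | zero =>
    intro f nxt k v l P C hfuel hminh hFR hNxt hPR hPt hComp hNP hV hVlen hC hldict
    have hf0 : f = [] := by
      cases f with
      | nil => rfl
      | cons a b => exfalso; simp only [List.length_cons] at hfuel; omega
    have hx0 : nxt = [] := by
      cases nxt with
      | nil => rfl
      | cons a b => exfalso; simp only [List.length_cons] at hfuel; omega
    subst hf0; subst hx0
    rw [levelLoop]
    refine (solve_alt_of_unreachable nums hn (deadEnd nums.length nums k P hPR hPt ?_ ?_)).symm
    · intro r hr
      rcases hComp r hr with h | h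
      · exact h
      · simp at h
    · intro u hu r hadj
      rcases hNP u hu r hadj with h | h | h
      · exact h
      · simp at h
      · simp at h
  | succ fuel ih =>
    have hcons : ∀ (i : Nat) (rest nxt : List Nat) (k : Nat) (v : List Bool)
        (l : PySem.Dict Int (List Nat)) (P : Finset Nat) (C : Finset Int),
        (i :: rest).length + nxt.length + Vcnt nums.length v + Wcnt nums.length nums C ≤ fuel + 1 →
        (∀ m, m < k → nums.length - 1 ∉ Rset nums.length nums m) →
        (∀ i' ∈ i :: rest, i' ∈ Rset nums.length nums k) →
        (∀ j ∈ nxt, j ∈ Rset nums.length nums (k + 1)) →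
        (∀ p ∈ P, p ∈ Rset nums.length nums k) →
        nums.length - 1 ∉ P →
        (∀ r ∈ Rset nums.length nums k, r ∈ P ∨ r ∈ i :: rest) →
        (∀ u ∈ P, ∀ r, adjB nums.length nums u r = true → r ∈ P ∨ r ∈ i :: rest ∨ r ∈ nxt) →
        (∀ j, v.getD j false = true → j ∈ P ∨ j ∈ i :: rest ∨ j ∈ nxt) →
        v.length = nums.length →
        (∀ c ∈ C, ∀ r ∈ grp nums.length nums c, r ∈ P ∨ r ∈ i :: rest ∨ r ∈ nxt) →
        (∀ c, l.getD c [] = if c ∈ C then [] else grp nums.length nums c) →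
        levelLoop nums.length nums (fuel + 1) (i :: rest) nxt (k : Int) v l = solve_alt nums := by
      intro i rest nxt k v l P C hfuel hminh hFR hNxt hPR hPt hComp hNP hV hVlen hC hldict
      have hiR : i ∈ Rset nums.length nums k := hFR i List.mem_cons_self
      have hin : i < nums.length := by
        have := Rset_subset_range nums.length nums hn k hiR; simpa using this
      rw [levelLoop]
      by_cases hlast : i = nums.length - 1
      · rw [if_pos hlast]
        exact (solve_alt_of_reachable nums hn k (by rwa [hlast] at hiR) hminh).symm
      · rw [if_neg hlast]
        have hi1 : i + 1 < nums.length := by omega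
        have hgrpi : i ∈ grp nums.length nums (nums.getD i 0) :=
          (mem_grp nums.length nums (nums.getD i 0) i).2 ⟨hin, rfl⟩
        have hjs := hldict (nums.getD i 0)
        -- soundness of the three neighbour classes
        have hadj_im1 : 1 ≤ i → (i - 1) ∈ Rset nums.length nums (k + 1) := by
          intro h
          exact (mem_Rset_succ_iff nums.length nums k (i - 1)).2 (Or.inr ⟨by omega, i, hiR,
            (adjB_true_iff nums.length nums i (i - 1)).2 ⟨by omega, Or.inl (by omega)⟩⟩)
        have hadj_ip1 : (i + 1) ∈ Rset nums.length nums (k + 1) :=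
          (mem_Rset_succ_iff nums.length nums k (i + 1)).2 (Or.inr ⟨hi1, i, hiR,
            (adjB_true_iff nums.length nums i (i + 1)).2 ⟨hi1, Or.inr (Or.inl rfl)⟩⟩)
        have hadj_grp : ∀ r ∈ grp nums.length nums (nums.getD i 0),
            r ∈ Rset nums.length nums (k + 1) := by
          intro r hr
          have h := (mem_grp nums.length nums (nums.getD i 0) r).1 hr
          exact (mem_Rset_succ_iff nums.length nums k r).2 (Or.inr ⟨h.1, i, hiR,
            (adjB_true_iff nums.length nums i r).2 ⟨h.1, Or.inr (Or.inr h.2)⟩⟩)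
        -- mapping old coverage into the new state
        have hmapPFN : ∀ (nxt3 : List Nat), (∀ j ∈ nxt, j ∈ nxt3) →
            ∀ r, (r ∈ P ∨ r ∈ i :: rest ∨ r ∈ nxt) →
              (r ∈ P ∨ r = i ∨ r ∈ rest ∨ r ∈ nxt3) := by
          intro nxt3 hold r h
          rcases h with h | h | h
          · exact Or.inl h
          · rcases List.mem_cons.1 h with h' | h'
            · exact Or.inr (Or.inl h')
            · exact Or.inr (Or.inr (Or.inl h'))
          · exact Or.inr (Or.inr (Or.inr (hold r h)))
        have mkcover : ∀ (nxt3 : List Nat), (∀ j ∈ nxt, j ∈ nxt3) →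
            (1 ≤ i → (i - 1) ∈ nxt3 ∨ v.getD (i - 1) false = true) →
            ((i + 1) ∈ nxt3 ∨ v.getD (i + 1) false = true) →
            ((∀ r ∈ grp nums.length nums (nums.getD i 0), r ∈ nxt3) ∨ nums.getD i 0 ∈ C) →
            ∀ r, adjB nums.length nums i r = true → r ∈ P ∨ r = i ∨ r ∈ rest ∨ r ∈ nxt3 := by
          intro nxt3 hold him1 hip1 hgrpc r hadj
          rw [adjB_true_iff] at hadj
          obtain ⟨hrn, hcase⟩ := hadj
          rcases hcase with h | h | h
          · have h1i : 1 ≤ i := by omega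
            have hr1 : r = i - 1 := by omega
            subst hr1
            rcases him1 h1i with h' | h'
            · exact Or.inr (Or.inr (Or.inr h'))
            · exact hmapPFN nxt3 hold (i - 1) (hV (i - 1) h')
          · subst h
            rcases hip1 with h' | h'
            · exact Or.inr (Or.inr (Or.inr h'))
            · exact hmapPFN nxt3 hold (i + 1) (hV (i + 1) h')
          · have hrg : r ∈ grp nums.length nums (nums.getD i 0) :=
              (mem_grp nums.length nums (nums.getD i 0) r).2 ⟨hrn, h⟩
            rcases hgrpc with h' | h'
            · exact Or.inr (Or.inr (Or.inr (h' r hrg)))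
            · exact hmapPFN nxt3 hold r (hC _ h' r hrg)
        have hsetD1 : ∀ j, (v.set (i - 1) true).getD j false = true →
            v.getD j false = true ∨ j = i - 1 := by
          intro j hj
          rw [set_getD] at hj
          by_cases hx : i - 1 = j ∧ i - 1 < v.length
          · exact Or.inr hx.1.symm
          · rw [if_neg hx] at hj; exact Or.inl hj
        have hsetD2 : ∀ (w : List Bool) (j : Nat), (w.set (i + 1) true).getD j false = true →
            w.getD j false = true ∨ j = i + 1 := by
          intro w j hj
          rw [set_getD] at hj
          by_cases hx : i + 1 = j ∧ i + 1 < w.length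
          · exact Or.inr hx.1.symm
          · rw [if_neg hx] at hj; exact Or.inl hj
        -- the main application of the induction hypothesis
        have main : ∀ (nxt3 : List Nat) (v2 : List Bool) (l3 : PySem.Dict Int (List Nat))
            (C' : Finset Int),
            (∀ j ∈ nxt3, j ∈ Rset nums.length nums (k + 1)) →
            (∀ j ∈ nxt, j ∈ nxt3) →
            (∀ r, adjB nums.length nums i r = true → r ∈ P ∨ r = i ∨ r ∈ rest ∨ r ∈ nxt3) →
            (∀ j, v2.getD j false = true → v.getD j false = true ∨ j ∈ nxt3) →
            v2.length = nums.length →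
            (∀ c' ∈ C', c' ∉ C → ∀ r ∈ grp nums.length nums c', r ∈ nxt3) →
            (∀ c', l3.getD c' [] = if c' ∈ C' then [] else grp nums.length nums c') →
            rest.length + nxt3.length + Vcnt nums.length v2 + Wcnt nums.length nums C' ≤ fuel →
            levelLoop nums.length nums fuel rest nxt3 (k : Int) v2 l3 = solve_alt nums := by
          intro nxt3 v2 l3 C' hmem3 hold3 hcover hV2 hV2len hCnew hl3 hfuel3
          refine ih rest nxt3 k v2 l3 (insert i P) C' hfuel3 hminh
            (fun j hj => hFR j (List.mem_cons_of_mem i hj)) hmem3 ?_ ?_ ?_ ?_ ?_ hV2len ?_ hl3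
          · intro p hp
            rcases Finset.mem_insert.1 hp with h | h
            · exact h ▸ hiR
            · exact hPR p h
          · intro h
            rcases Finset.mem_insert.1 h with h' | h'
            exacts [hlast h'.symm, hPt h']
          · intro r hr
            rcases hComp r hr with h | h
            · exact Or.inl (Finset.mem_insert_of_mem h)
            · rcases List.mem_cons.1 h with h' | h'
              · exact Or.inl (h' ▸ Finset.mem_insert_self i P)
              · exact Or.inr h'
          · intro u hu r hadj
            rcases Finset.mem_insert.1 hu with h | h
            · subst h
              rcases hcover r hadj with h' | h' | h' | h'
              · exact Or.inl (Finset.mem_insert_of_mem h')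
              · exact Or.inl (h' ▸ Finset.mem_insert_self u P)
              · exact Or.inr (Or.inl h')
              · exact Or.inr (Or.inr h')
            · rcases hNP u h r hadj with h' | h' | h'
              · exact Or.inl (Finset.mem_insert_of_mem h')
              · rcases List.mem_cons.1 h' with h'' | h''
                · exact Or.inl (h'' ▸ Finset.mem_insert_self i P)
                · exact Or.inr (Or.inl h'')
              · exact Or.inr (Or.inr (hold3 r h'))
          · intro j hj
            rcases hV2 j hj with h | h
            · rcases hV j h with h' | h' | h'
              · exact Or.inl (Finset.mem_insert_of_mem h')
              · rcases List.mem_cons.1 h' with h'' | h''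
                · exact Or.inl (h'' ▸ Finset.mem_insert_self i P)
                · exact Or.inr (Or.inl h'')
              · exact Or.inr (Or.inr (hold3 j h'))
            · exact Or.inr (Or.inr h)
          · intro c' hc' r hr
            by_cases hcC : c' ∈ C
            · rcases hC c' hcC r hr with h' | h' | h'
              · exact Or.inl (Finset.mem_insert_of_mem h')
              · rcases List.mem_cons.1 h' with h'' | h''
                · exact Or.inl (h'' ▸ Finset.mem_insert_self i P)
                · exact Or.inr (Or.inl h'')
              · exact Or.inr (Or.inr (hold3 r h'))
            · exact Or.inr (Or.inr (hCnew c' hc' hcC r hr))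
        simp only [List.length_cons] at hfuel
        -- dict bookkeeping shared by the teleport branches
        have hteleport_pos : ∀ (h3 : ¬ l.getD (nums.getD i 0) [] = []),
            nums.getD i 0 ∉ C ∧
              l.getD (nums.getD i 0) [] = grp nums.length nums (nums.getD i 0) := by
          intro h3
          have hcC : nums.getD i 0 ∉ C := by
            intro hx
            exact h3 (by rw [hjs, if_pos hx])
          exact ⟨hcC, by rw [hjs, if_neg hcC]⟩
        have hteleport_neg : ∀ (h3 : l.getD (nums.getD i 0) [] = []), nums.getD i 0 ∈ C := by
          intro h3
          by_contra hx
          rw [hjs, if_neg hx] at h3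
          rw [h3] at hgrpi
          simp at hgrpi
        have hl3ins : ∀ c', (l.insert (nums.getD i 0) []).getD c' []
            = if c' ∈ insert (nums.getD i 0) C then [] else grp nums.length nums c' := by
          intro c'
          rw [PySem.Dict.getD_insert]
          by_cases hx : c' = nums.getD i 0
          · rw [if_pos hx, if_pos (by simp [hx])]
          · rw [if_neg hx, hldict c']
            by_cases hy : c' ∈ C
            · rw [if_pos hy, if_pos (Finset.mem_insert_of_mem hy)]
            · rw [if_neg hy, if_neg (by
                intro h
                rcases Finset.mem_insert.1 h with h' | h'
                exacts [hx h', hy h'])]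
        have hCnew_ins : ∀ (nxt3 : List Nat),
            (∀ r ∈ grp nums.length nums (nums.getD i 0), r ∈ nxt3) →
            ∀ c' ∈ insert (nums.getD i 0) C, c' ∉ C →
              ∀ r ∈ grp nums.length nums c', r ∈ nxt3 := by
          intro nxt3 hg c' hc' hcn r hr
          have : c' = nums.getD i 0 := by
            rcases Finset.mem_insert.1 hc' with h | h
            · exact h
            · exact absurd h hcn
          exact hg r (this ▸ hr)
        have hCnew_same : ∀ (nxt3 : List Nat), ∀ c' ∈ C, c' ∉ C →
            ∀ r ∈ grp nums.length nums c', r ∈ nxt3 := by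
          intro nxt3 c' hc' hcn
          exact absurd hc' hcn
        by_cases h1 : 1 ≤ i ∧ v.getD (i - 1) false = false
        · simp only [if_pos h1]
          have e1 : Vcnt nums.length (v.set (i - 1) true) + 1 = Vcnt nums.length v :=
            Vcnt_set nums.length v (i - 1) (by omega) hVlen h1.2
          have hlen1 : (v.set (i - 1) true).length = nums.length := by simp [hVlen]
          by_cases h2 : (v.set (i - 1) true).getD (i + 1) false = false
          · simp only [if_pos h2]
            have e2 : Vcnt nums.length ((v.set (i - 1) true).set (i + 1) true) + 1
                = Vcnt nums.length (v.set (i - 1) true) :=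
              Vcnt_set nums.length _ (i + 1) hi1 hlen1 h2
            have hv2 : ∀ j, ((v.set (i - 1) true).set (i + 1) true).getD j false = true →
                v.getD j false = true ∨ j = i - 1 ∨ j = i + 1 := by
              intro j hj
              rcases hsetD2 _ j hj with h | h
              · rcases hsetD1 j h with h' | h'
                · exact Or.inl h'
                · exact Or.inr (Or.inl h')
              · exact Or.inr (Or.inr h)
            by_cases h3 : l.getD (nums.getD i 0) [] = []
            · simp only [h3, ne_eq, not_true_eq_false, if_false]
              refine main (nxt ++ [i - 1] ++ [i + 1]) _ l C ?_ ?_ ?_ ?_ (by simp [hVlen]) (hCnew_same _) hldict ?_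
              · intro j hj
                simp only [List.mem_append, List.mem_singleton] at hj
                rcases hj with (hj | hj) | hj
                · exact hNxt j hj
                · exact hj ▸ hadj_im1 h1.1
                · exact hj ▸ hadj_ip1
              · intro j hj; simp [List.mem_append, hj]
              · refine mkcover _ (fun j hj => by simp [List.mem_append, hj]) ?_ ?_ ?_
                · intro _; exact Or.inl (by simp [List.mem_append])
                · exact Or.inl (by simp [List.mem_append])
                · exact Or.inr (hteleport_neg h3)
              · intro j hj
                rcases hv2 j hj with h | h | h
                · exact Or.inl h
                · exact Or.inr (by simp [List.mem_append, h])
                · exact Or.inr (by simp [List.mem_append, h])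
              · simp only [List.length_append, List.length_singleton]
                omega
            · rw [if_pos h3]
              obtain ⟨hcC, hjsg⟩ := hteleport_pos h3
              rw [hjsg]
              have e3 : Wcnt nums.length nums (insert (nums.getD i 0) C)
                  + (grp nums.length nums (nums.getD i 0)).length = Wcnt nums.length nums C :=
                Wcnt_insert nums.length nums C (nums.getD i 0) hcC
              refine main (nxt ++ [i - 1] ++ [i + 1] ++ grp nums.length nums (nums.getD i 0)) _
                (l.insert (nums.getD i 0) []) (insert (nums.getD i 0) C) ?_ ?_ ?_ ?_
                (by simp [hVlen]) (hCnew_ins _ (fun r hr => List.mem_append_right _ hr)) hl3ins ?_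
              · intro j hj
                simp only [List.mem_append, List.mem_singleton] at hj
                rcases hj with ((hj | hj) | hj) | hj
                · exact hNxt j hj
                · exact hj ▸ hadj_im1 h1.1
                · exact hj ▸ hadj_ip1
                · exact hadj_grp j hj
              · intro j hj; simp [List.mem_append, hj]
              · refine mkcover _ (fun j hj => by simp [List.mem_append, hj]) ?_ ?_ ?_
                · intro _; exact Or.inl (by simp [List.mem_append])
                · exact Or.inl (by simp [List.mem_append])
                · exact Or.inl (fun r hr => List.mem_append_right _ hr)
              · intro j hj
                rcases hv2 j hj with h | h | h
                · exact Or.inl h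
                · exact Or.inr (by simp [List.mem_append, h])
                · exact Or.inr (by simp [List.mem_append, h])
              · simp only [List.length_append, List.length_singleton]
                omega
          · simp only [if_neg h2]
            have hvip1 : v.getD (i + 1) false = true := by
              have h2' : (v.set (i - 1) true).getD (i + 1) false = true := by
                cases hx : (v.set (i - 1) true).getD (i + 1) false
                · exact absurd hx h2
                · rfl
              rcases hsetD1 (i + 1) h2' with h | h
              · exact h
              · omega
            by_cases h3 : l.getD (nums.getD i 0) [] = []
            · simp only [h3, ne_eq, not_true_eq_false, if_false]
              refine main (nxt ++ [i - 1]) _ l C ?_ ?_ ?_ ?_ hlen1 (hCnew_same _) hldict ?_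
              · intro j hj
                simp only [List.mem_append, List.mem_singleton] at hj
                rcases hj with hj | hj
                · exact hNxt j hj
                · exact hj ▸ hadj_im1 h1.1
              · intro j hj; simp [List.mem_append, hj]
              · refine mkcover _ (fun j hj => by simp [List.mem_append, hj]) ?_ ?_ ?_
                · intro _; exact Or.inl (by simp [List.mem_append])
                · exact Or.inr hvip1
                · exact Or.inr (hteleport_neg h3)
              · intro j hj
                rcases hsetD1 j hj with h | h
                · exact Or.inl h
                · exact Or.inr (by simp [List.mem_append, h])
              · simp only [List.length_append, List.length_singleton]
                omega
            · rw [if_pos h3]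
              obtain ⟨hcC, hjsg⟩ := hteleport_pos h3
              rw [hjsg]
              have e3 : Wcnt nums.length nums (insert (nums.getD i 0) C)
                  + (grp nums.length nums (nums.getD i 0)).length = Wcnt nums.length nums C :=
                Wcnt_insert nums.length nums C (nums.getD i 0) hcC
              refine main (nxt ++ [i - 1] ++ grp nums.length nums (nums.getD i 0)) _
                (l.insert (nums.getD i 0) []) (insert (nums.getD i 0) C) ?_ ?_ ?_ ?_
                hlen1 (hCnew_ins _ (fun r hr => List.mem_append_right _ hr)) hl3ins ?_
              · intro j hj
                simp only [List.mem_append, List.mem_singleton] at hj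
                rcases hj with (hj | hj) | hj
                · exact hNxt j hj
                · exact hj ▸ hadj_im1 h1.1
                · exact hadj_grp j hj
              · intro j hj; simp [List.mem_append, hj]
              · refine mkcover _ (fun j hj => by simp [List.mem_append, hj]) ?_ ?_ ?_
                · intro _; exact Or.inl (by simp [List.mem_append])
                · exact Or.inr hvip1
                · exact Or.inl (fun r hr => List.mem_append_right _ hr)
              · intro j hj
                rcases hsetD1 j hj with h | h
                · exact Or.inl h
                · exact Or.inr (by simp [List.mem_append, h])
              · simp only [List.length_append, List.length_singleton]
                omega
        · simp only [if_neg h1]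
          have him1cov : 1 ≤ i → v.getD (i - 1) false = true := by
            intro hge
            by_contra hx
            exact h1 ⟨hge, by cases hy : v.getD (i - 1) false
                              · rfl
                              · exact absurd hy hx⟩
          by_cases h2 : v.getD (i + 1) false = false
          · simp only [if_pos h2]
            have e2 : Vcnt nums.length (v.set (i + 1) true) + 1 = Vcnt nums.length v :=
              Vcnt_set nums.length v (i + 1) hi1 hVlen h2
            by_cases h3 : l.getD (nums.getD i 0) [] = []
            · simp only [h3, ne_eq, not_true_eq_false, if_false]
              refine main (nxt ++ [i + 1]) _ l C ?_ ?_ ?_ ?_ (by simp [hVlen]) (hCnew_same _) hldict ?_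
              · intro j hj
                simp only [List.mem_append, List.mem_singleton] at hj
                rcases hj with hj | hj
                · exact hNxt j hj
                · exact hj ▸ hadj_ip1
              · intro j hj; simp [List.mem_append, hj]
              · refine mkcover _ (fun j hj => by simp [List.mem_append, hj]) ?_ ?_ ?_
                · intro hge; exact Or.inr (him1cov hge)
                · exact Or.inl (by simp [List.mem_append])
                · exact Or.inr (hteleport_neg h3)
              · intro j hj
                rcases hsetD2 v j hj with h | h
                · exact Or.inl h
                · exact Or.inr (by simp [List.mem_append, h])
              · simp only [List.length_append, List.length_singleton]
                omega
            · rw [if_pos h3]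
              obtain ⟨hcC, hjsg⟩ := hteleport_pos h3
              rw [hjsg]
              have e3 : Wcnt nums.length nums (insert (nums.getD i 0) C)
                  + (grp nums.length nums (nums.getD i 0)).length = Wcnt nums.length nums C :=
                Wcnt_insert nums.length nums C (nums.getD i 0) hcC
              refine main (nxt ++ [i + 1] ++ grp nums.length nums (nums.getD i 0)) _
                (l.insert (nums.getD i 0) []) (insert (nums.getD i 0) C) ?_ ?_ ?_ ?_
                (by simp [hVlen]) (hCnew_ins _ (fun r hr => List.mem_append_right _ hr)) hl3ins ?_
              · intro j hj
                simp only [List.mem_append, List.mem_singleton] at hj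
                rcases hj with (hj | hj) | hj
                · exact hNxt j hj
                · exact hj ▸ hadj_ip1
                · exact hadj_grp j hj
              · intro j hj; simp [List.mem_append, hj]
              · refine mkcover _ (fun j hj => by simp [List.mem_append, hj]) ?_ ?_ ?_
                · intro hge; exact Or.inr (him1cov hge)
                · exact Or.inl (by simp [List.mem_append])
                · exact Or.inl (fun r hr => List.mem_append_right _ hr)
              · intro j hj
                rcases hsetD2 v j hj with h | h
                · exact Or.inl h
                · exact Or.inr (by simp [List.mem_append, h])
              · simp only [List.length_append, List.length_singleton]
                omega
          · simp only [if_neg h2]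
            have hvip1 : v.getD (i + 1) false = true := by
              cases hx : v.getD (i + 1) false
              · exact absurd hx h2
              · rfl
            by_cases h3 : l.getD (nums.getD i 0) [] = []
            · simp only [h3, ne_eq, not_true_eq_false, if_false]
              refine main nxt v l C hNxt (fun j hj => hj) ?_ (fun j hj => Or.inl hj)
                hVlen (hCnew_same _) hldict ?_
              · refine mkcover _ (fun j hj => hj) ?_ ?_ ?_
                · intro hge; exact Or.inr (him1cov hge)
                · exact Or.inr hvip1
                · exact Or.inr (hteleport_neg h3)
              · omega
            · rw [if_pos h3]
              obtain ⟨hcC, hjsg⟩ := hteleport_pos h3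
              rw [hjsg]
              have e3 : Wcnt nums.length nums (insert (nums.getD i 0) C)
                  + (grp nums.length nums (nums.getD i 0)).length = Wcnt nums.length nums C :=
                Wcnt_insert nums.length nums C (nums.getD i 0) hcC
              refine main (nxt ++ grp nums.length nums (nums.getD i 0)) v
                (l.insert (nums.getD i 0) []) (insert (nums.getD i 0) C) ?_ ?_ ?_
                (fun j hj => Or.inl hj) hVlen
                (hCnew_ins _ (fun r hr => List.mem_append_right _ hr)) hl3ins ?_
              · intro j hj
                simp only [List.mem_append] at hj
                rcases hj with hj | hj
                · exact hNxt j hj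
                · exact hadj_grp j hj
              · intro j hj; simp [List.mem_append, hj]
              · refine mkcover _ (fun j hj => by simp [List.mem_append, hj]) ?_ ?_ ?_
                · intro hge; exact Or.inr (him1cov hge)
                · exact Or.inr hvip1
                · exact Or.inl (fun r hr => List.mem_append_right _ hr)
              · simp only [List.length_append]
                omega
    intro f nxt k v l P C hfuel hminh hFR hNxt hPR hPt hComp hNP hV hVlen hC hldict
    cases f with
    | cons i rest =>
      exact hcons i rest nxt k v l P C hfuel hminh hFR hNxt hPR hPt hComp hNP hV hVlen hC hldict
    | nil =>
      cases nxt with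
      | nil =>
        rw [levelLoop]
        refine (solve_alt_of_unreachable nums hn
          (deadEnd nums.length nums k P hPR hPt ?_ ?_)).symm
        · intro r hr
          rcases hComp r hr with h | h
          · exact h
          · simp at h
        · intro u hu r hadj
          rcases hNP u hu r hadj with h | h | h
          · exact h
          · simp at h
          · simp at h
      | cons j tl =>
        rw [levelLoop]
        have hPk : ∀ r ∈ Rset nums.length nums k, r ∈ P := by
          intro r hr
          rcases hComp r hr with h | h
          · exact h
          · simp at h
        have hcast : ((k : Int) + 1) = ((k + 1 : Nat) : Int) := by push_cast; ring
        rw [hcast]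
        refine hcons j tl [] (k + 1) v l P C ?_ ?_ ?_ ?_ ?_ hPt ?_ ?_ ?_ hVlen ?_ hldict
        · simpa using hfuel
        · intro m hm
          rcases Nat.lt_or_ge m k with h | h
          · exact hminh m h
          · have hmk : m = k := by omega
            subst hmk
            exact fun hx => hPt (hPk _ hx)
        · exact fun i hi => hNxt i hi
        · intro j' hj'; simp at hj'
        · exact fun p hp => Rset_subset_succ nums.length nums k (hPR p hp)
        · intro r hr
          rcases (mem_Rset_succ_iff nums.length nums k r).1 hr with h | ⟨hrn, u, hu, hadj⟩
          · exact Or.inl (hPk r h)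
          · rcases hNP u (hPk u hu) r hadj with h' | h' | h'
            · exact Or.inl h'
            · simp at h'
            · exact Or.inr h'
        · intro u hu r hadj
          rcases hNP u hu r hadj with h' | h' | h'
          · exact Or.inl h'
          · simp at h'
          · exact Or.inr (Or.inl h')
        · intro j' hj'
          rcases hV j' hj' with h' | h' | h'
          · exact Or.inl h'
          · simp at h'
          · exact Or.inr (Or.inl h')
        · intro c hc r hr
          rcases hC c hc r hr with h' | h' | h'
          · exact Or.inl h'
          · simp at h'
          · exact Or.inr (Or.inl h')

-- ===== VERDICT (by name: the statement is the Claim_ definition above) =====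
theorem solve_spec : Claim_equal_solve := by
  intro nums _ hpre
  unfold Spec_solve
  have hn : 0 < nums.length := List.length_pos_iff.mpr hpre
  have h1 : solve nums = levelLoop nums.length nums (3 * nums.length + 2) [0] [] 0
      ((List.replicate nums.length false).set 0 true)
      ((PySem.List.enumerate nums).foldl
        (fun d p => d.modify p.2 [] (· ++ [p.1.toNat])) PySem.Dict.empty) := by
    rw [← loopA_eq_levelLoop nums.length nums (3 * nums.length + 2) [0] [] 0]; rfl
  rw [h1]
  have hz : (0 : Int) = ((0 : Nat) : Int) := rfl
  rw [hz]
  refine masterA nums.length nums hn rfl (3 * nums.length + 2) [0] [] 0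
    ((List.replicate nums.length false).set 0 true)
    ((PySem.List.enumerate nums).foldl
      (fun d p => d.modify p.2 [] (· ++ [p.1.toNat])) PySem.Dict.empty) ∅ ∅
    ?_ ?_ ?_ ?_ ?_ ?_ ?_ ?_ ?_ ?_ ?_ ?_
  · -- fuel
    have h1 : Vcnt nums.length ((List.replicate nums.length false).set 0 true) ≤ nums.length := by
      unfold Vcnt
      simpa using Finset.card_filter_le (Finset.range nums.length) _
    have h2 : Wcnt nums.length nums ∅ ≤ nums.length := by
      unfold Wcnt
      simpa using Finset.card_filter_le (Finset.range nums.length) _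
    simp only [List.length_cons, List.length_nil]
    omega
  · exact fun m hm => absurd hm (Nat.not_lt_zero m)
  · intro i hi
    simp only [List.mem_singleton] at hi
    subst hi
    simp [Rset]
  · intro j hj; simp at hj
  · intro p hp; simp at hp
  · simp
  · intro r hr
    simp only [Rset, Finset.mem_singleton] at hr
    subst hr
    simp
  · intro u hu; simp at hu
  · intro j hj
    rw [reach0_getD] at hj
    simp only [decide_eq_true_eq] at hj
    right; left
    simp [hj.1]
  · simp
  · intro c hc; simp at hc
  · intro c
    simp only [Finset.notMem_empty, if_false]
    exact locs_getD nums c
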